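-- pv_equiv track=rewrite | github.com/laelbec/laelbec | assignment8.py | oldest_date
-- ===== SOURCE A (Python) =====
-- FIRST = 0
--
-- ONE_TUP = 1
--
-- Date = tuple[int, int, int]
--
-- YEAR  = 0
--
-- MONTH = 1
--
-- DAY   = 2
--
-- def oldest_date(lo_date: list[Date]) -> Date:
--     """returns the oldest Date from given list
--     Precondition: lo_date != []
--     >>> dates = [(2004, 10, 20)]
--     >>> oldest_date(dates)
--     (2004, 10, 20)
--
--     >>> dates = [(2019, 4, 5), (2017, 9, 2), (2009, 4, 8), (2022, 3, 9)]
--     >>> oldest_date(dates)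
--     (2009, 4, 8)
--
--     >>> dates = [(2019, 4, 5), (2017, 9, 2), (2009, 4, 8), (2009, 3, 9)]
--     >>> oldest_date(dates)
--     (2009, 3, 9)
--
--     >>> dates = [(2019, 4, 5), (2017, 9, 2), (2009, 4, 8), (2009, 4, 9)]
--     >>> oldest_date(dates)
--     (2009, 4, 8)
--
--     >>> dates = [(2019, 4, 5), (2017, 9, 2), (2009, 4, 8), (2009, 4, 8)]
--     >>> oldest_date(dates)
--     (2009, 4, 8)
--     """
--     num_elements = len(lo_date)
--     if num_elements == ONE_TUP:
--         return lo_date[FIRST]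
--
--     smallest = lo_date[FIRST]
--     for index in range(1, num_elements):
--         compare = lo_date[index]
--         if compare[YEAR] < smallest[YEAR]:
--             smallest = compare
--         elif (compare[YEAR] == smallest[YEAR] and
--               compare[MONTH] < smallest[MONTH]):
--             smallest = compare
--         elif (compare[YEAR] == smallest[YEAR] and compare[MONTH] ==
--         smallest[MONTH] and compare[DAY] < smallest[DAY]):
--             smallest = compare
--         else:
--             smallest = smallest
--
--     return smallest
-- ===== SOURCE B (Python) =====
-- def oldest_date(lo_date):
--     return sorted(lo_date)[0]
-- ===== Notes on version B (the rewrite author's own statement) =====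
-- stated objective: simpler
-- what changed: Replaces A's hand-written year/month/day running-min index loop with a one-line sort-then-take-first: sorted(lo_date)[0], relying on Python's lexicographic tuple ordering.
import Mathlib
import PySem

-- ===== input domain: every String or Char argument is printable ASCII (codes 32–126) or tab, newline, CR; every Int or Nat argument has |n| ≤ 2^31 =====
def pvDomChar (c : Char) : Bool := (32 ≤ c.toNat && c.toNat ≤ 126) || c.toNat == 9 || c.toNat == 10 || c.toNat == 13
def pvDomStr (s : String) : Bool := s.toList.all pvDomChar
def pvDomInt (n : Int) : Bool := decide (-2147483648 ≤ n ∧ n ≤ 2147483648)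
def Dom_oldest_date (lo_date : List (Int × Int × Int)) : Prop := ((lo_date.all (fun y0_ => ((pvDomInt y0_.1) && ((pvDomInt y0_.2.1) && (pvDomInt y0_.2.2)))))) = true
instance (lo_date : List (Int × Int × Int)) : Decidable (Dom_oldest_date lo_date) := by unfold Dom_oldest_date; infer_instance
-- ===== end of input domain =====

-- B replaces A's hand-written year/month/day min-scan by sorting the list (Python's default
-- stable lexicographic tuple order) and taking the first element: simpler, not faster.

-- ===== PORT A =====
def oldest_date (lo_date : List (Int × Int × Int)) : Int × Int × Int :=
  let num_elements : Int := PySem.List.len lo_date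
  if num_elements == 1 then PySem.List.pyGetD lo_date 0 (0, 0, 0)
  else
    (PySem.List.pyRange 1 num_elements 1).foldl
      (fun smallest index =>
        let compare := PySem.List.pyGetD lo_date index (0, 0, 0)
        if compare.1 < smallest.1 then compare
        else if compare.1 = smallest.1 ∧ compare.2.1 < smallest.2.1 then compare
        else if compare.1 = smallest.1 ∧ compare.2.1 = smallest.2.1 ∧ compare.2.2 < smallest.2.2 then compare
        else smallest)
      (PySem.List.pyGetD lo_date 0 (0, 0, 0))

-- ===== PORT B =====
-- Python's '<' on 3-tuples of ints: lexicographic comparison (exact)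
def pyTupLt (a b : Int × Int × Int) : Bool :=
  decide (a.1 < b.1 ∨ (a.1 = b.1 ∧ (a.2.1 < b.2.1 ∨ (a.2.1 = b.2.1 ∧ a.2.2 < b.2.2))))

-- sorted(lo_date)[0]: sorted = stable insertion sort under Python's tuple '<' (PySem's sorted shape)
def oldest_date_alt (lo_date : List (Int × Int × Int)) : Int × Int × Int :=
  (PySem.List.pyGet?
    (lo_date.foldl (fun acc x => PySem.List.insertBy pyTupLt x acc) []) 0).getD (0, 0, 0)

-- ===== PRECONDITION & SPEC =====
-- Pre_ excludes only the empty list: A raises IndexError there (the docstring precondition), B raises too.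
def Pre_oldest_date (lo_date : List (Int × Int × Int)) : Prop := lo_date ≠ []
instance (lo_date : List (Int × Int × Int)) : Decidable (Pre_oldest_date lo_date) := by
  unfold Pre_oldest_date; infer_instance

def pvWitness_oldest_date : (List (Int × Int × Int)) := [(2019, 4, 5), (2009, 4, 8)]

def Spec_oldest_date (lo_date : List (Int × Int × Int)) (out : Int × Int × Int) : Prop := out = oldest_date_alt lo_date
instance (lo_date : List (Int × Int × Int)) (out : Int × Int × Int) : Decidable (Spec_oldest_date lo_date out) := by unfold Spec_oldest_date; infer_instance

-- ===== CLAIM (what is proved, stated in full; the proofs are below) =====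
def Claim_equal_oldest_date : Prop := ∀ (lo_date : List (Int × Int × Int)), Dom_oldest_date lo_date → Pre_oldest_date lo_date → Spec_oldest_date lo_date (oldest_date lo_date)

-- ===== LEMMAS AND PROOFS =====

-- the lexicographic key Python's tuple comparison realises
def pvKey (d : Int × Int × Int) : Int ×ₗ (Int ×ₗ Int) := toLex (d.1, toLex (d.2.1, d.2.2))

theorem pvKey_injective : Function.Injective pvKey := by
  intro a b h
  simp only [pvKey, toLex_inj, Prod.mk.injEq] at h
  obtain ⟨h1, h2, h3⟩ := h
  exact Prod.ext h1 (Prod.ext h2 h3)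

theorem pvKey_lt_iff (a b : Int × Int × Int) :
    pvKey a < pvKey b ↔
      (a.1 < b.1 ∨ (a.1 = b.1 ∧ (a.2.1 < b.2.1 ∨ (a.2.1 = b.2.1 ∧ a.2.2 < b.2.2)))) := by
  simp [pvKey, Prod.Lex.lt_iff]

theorem pyTupLt_eq_key : pyTupLt = fun a b => decide (pvKey a < pvKey b) := by
  funext a b
  simp only [pyTupLt]
  exact decide_eq_decide.mpr (pvKey_lt_iff a b).symm

theorem alt_eq_sorted (lo : List (Int × Int × Int)) :
    oldest_date_alt lo =
      (PySem.List.pyGet? (PySem.List.sorted lo pvKey) 0).getD (0, 0, 0) := by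
  unfold oldest_date_alt
  rw [pyTupLt_eq_key, ← PySem.List.sorted_eq_foldl_insertBy]

-- the running-min loop body of A keeps the lex-smaller date
theorem step_eq (s c : Int × Int × Int) :
    (if c.1 < s.1 then c
     else if c.1 = s.1 ∧ c.2.1 < s.2.1 then c
     else if c.1 = s.1 ∧ c.2.1 = s.2.1 ∧ c.2.2 < s.2.2 then c
     else s) = if pvKey c < pvKey s then c else s := by
  simp only [pvKey_lt_iff]
  split_ifs <;> first | rfl | omega

-- invariant of the running-min fold
theorem foldl_min_spec (t : List (Int × Int × Int)) (a : Int × Int × Int) :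
    (t.foldl (fun s c => if pvKey c < pvKey s then c else s) a = a ∨
       t.foldl (fun s c => if pvKey c < pvKey s then c else s) a ∈ t) ∧
    pvKey (t.foldl (fun s c => if pvKey c < pvKey s then c else s) a) ≤ pvKey a ∧
    ∀ y ∈ t, pvKey (t.foldl (fun s c => if pvKey c < pvKey s then c else s) a) ≤ pvKey y := by
  induction t generalizing a with
  | nil => simp
  | cons x xs ih =>
    simp only [List.foldl_cons, List.mem_cons]
    obtain ⟨hmem, hle, hall⟩ := ih (if pvKey x < pvKey a then x else a)
    refine ⟨?_, ?_, ?_⟩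
    · rcases hmem with h | h
      · rw [h]; split_ifs with hx
        · exact Or.inr (Or.inl rfl)
        · exact Or.inl rfl
      · exact Or.inr (Or.inr h)
    · refine le_trans hle ?_
      split_ifs with hx
      · exact le_of_lt hx
      · exact le_refl _
    · intro y hy
      rcases hy with rfl | hy
      · refine le_trans hle ?_
        split_ifs with hx
        · exact le_refl _
        · exact le_of_not_gt hx
      · exact hall y hy

-- A computes an element of the list whose key is minimal
theorem oldest_date_min (x : Int × Int × Int) (t : List (Int × Int × Int)) :
    oldest_date (x :: t) ∈ x :: t ∧
      ∀ y ∈ x :: t, pvKey (oldest_date (x :: t)) ≤ pvKey y := by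
  unfold oldest_date
  simp only [PySem.List.len_eq, beq_iff_eq]
  by_cases h1 : (((x :: t).length : Int) = 1)
  · have ht : t = [] := by
      have := h1
      simp only [List.length_cons] at this
      have h0 : t.length = 0 := by omega
      exact List.eq_nil_of_length_eq_zero h0
    subst ht
    rw [if_pos h1]
    simp [PySem.List.pyGetD_zero_cons]
  · rw [if_neg h1]
    have hfold :
        (PySem.List.pyRange 1 ((x :: t).length : Int) 1).foldl
          (fun smallest index =>
            let compare := PySem.List.pyGetD (x :: t) index (0, 0, 0)
            if compare.1 < smallest.1 then compare
            else if compare.1 = smallest.1 ∧ compare.2.1 < smallest.2.1 then compare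
            else if compare.1 = smallest.1 ∧ compare.2.1 = smallest.2.1 ∧ compare.2.2 < smallest.2.2 then compare
            else smallest)
          (PySem.List.pyGetD (x :: t) 0 (0, 0, 0)) =
        t.foldl (fun s c => if pvKey c < pvKey s then c else s) x := by
      rw [PySem.List.foldl_pyRange_pyGetD' (x :: t) (0, 0, 0)
            (fun s c =>
              if c.1 < s.1 then c
              else if c.1 = s.1 ∧ c.2.1 < s.2.1 then c
              else if c.1 = s.1 ∧ c.2.1 = s.2.1 ∧ c.2.2 < s.2.2 then c
              else s)
            (PySem.List.pyGetD (x :: t) 0 (0, 0, 0)) (a := 1) (by omega)]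
      simp only [PySem.List.pyGetD_zero_cons, Int.toNat_one, List.drop_succ_cons, List.drop_zero]
      exact PySem.List.foldl_congr_mem t _ _ x (fun s c _ => step_eq s c)
    rw [hfold]
    obtain ⟨hmem, hle, hall⟩ := foldl_min_spec t x
    constructor
    · rcases hmem with h | h
      · rw [h]; exact List.mem_cons_self
      · exact List.mem_cons_of_mem _ h
    · intro y hy
      rcases List.mem_cons.mp hy with rfl | hy
      · exact hle
      · exact hall y hy

-- ===== VERDICT (by name: the statement is the Claim_ definition above) =====
theorem oldest_date_spec : Claim_equal_oldest_date := by
  intro lo _ hpre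
  unfold Spec_oldest_date
  cases lo with
  | nil => exact absurd rfl hpre
  | cons x t =>
    obtain ⟨hmemA, hminA⟩ := oldest_date_min x t
    rw [alt_eq_sorted]
    obtain ⟨m, s, hs⟩ : ∃ m s, PySem.List.sorted (x :: t) pvKey = m :: s := by
      rcases hsort : PySem.List.sorted (x :: t) pvKey with _ | ⟨m, s⟩
      · exact absurd ((PySem.List.sorted_eq_nil_iff _ _ _).mp hsort) (by simp)
      · exact ⟨m, s, rfl⟩
    rw [hs]
    simp only [PySem.List.pyGet?_zero_cons, Option.getD_some]
    have hmemB : m ∈ x :: t := by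
      have hm : m ∈ PySem.List.sorted (x :: t) pvKey := by rw [hs]; exact List.mem_cons_self
      exact (PySem.List.mem_sorted _ _ _ _).mp hm
    have hminB : ∀ y ∈ x :: t, pvKey m ≤ pvKey y :=
      PySem.List.key_head_sorted_le (x :: t) pvKey hs
    exact pvKey_injective (le_antisymm (hminA m hmemB) (hminB _ hmemA))
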